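-- pv_equiv track=rewrite | github.com/lmorchard/decafclaw | src/decafclaw/tools/email_tools.py | _recipient_allowed
-- ===== SOURCE A (Python) =====
-- def _recipient_allowed(addr: str, allowlist: list[str]) -> bool:
--     """Match an address against allowlist entries (case-insensitive).
--
--     Entry shapes:
--     - Exact address: ``alice@example.com`` matches only that address.
--     - Domain suffix: ``@example.com`` matches any address ending with
--       that domain.
--     Empty addr or empty allowlist → never allowed.
--     """
--     if not addr or not allowlist:
--         return False
--     addr_lower = addr.strip().lower()
--     for entry in allowlist:
--         entry_lower = entry.strip().lower()
--         if not entry_lower: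
--             continue
--         if entry_lower.startswith("@"):
--             if addr_lower.endswith(entry_lower):
--                 return True
--         elif addr_lower == entry_lower:
--             return True
--     return False
-- ===== SOURCE B (Python) =====
-- def _recipient_allowed(addr: str, allowlist: list[str]) -> bool:
--     """Build one set of all normalized non-empty allowlist entries, then
--     generate candidate keys from the address itself (the whole address plus
--     every suffix starting at an '@' character) and test set membership.
--     Correct because a '@domain' entry matches addr exactly when that entry
--     is a suffix of addr beginning with '@', i.e. one of these candidates."""
--     entries = set()
--     for raw in allowlist:
--         e = raw.strip().lower()
--         if e:
--             entries.add(e)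
--     a = addr.strip().lower()
--     if a in entries:
--         return True
--     return any(a[i:] in entries for i, ch in enumerate(a) if ch == "@")
-- ===== Notes on version B (the rewrite author's own statement) =====
-- stated objective: alternative
-- what changed: B inverts the matching direction: instead of scanning entries and testing endswith per '@'-entry, it builds one set of all normalized non-empty entries and generates candidate keys from the address itself (the whole address plus each suffix starting at an '@' character), answering by set membership only — no endswith and no per-entry branch at query time.
import Mathlib
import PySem

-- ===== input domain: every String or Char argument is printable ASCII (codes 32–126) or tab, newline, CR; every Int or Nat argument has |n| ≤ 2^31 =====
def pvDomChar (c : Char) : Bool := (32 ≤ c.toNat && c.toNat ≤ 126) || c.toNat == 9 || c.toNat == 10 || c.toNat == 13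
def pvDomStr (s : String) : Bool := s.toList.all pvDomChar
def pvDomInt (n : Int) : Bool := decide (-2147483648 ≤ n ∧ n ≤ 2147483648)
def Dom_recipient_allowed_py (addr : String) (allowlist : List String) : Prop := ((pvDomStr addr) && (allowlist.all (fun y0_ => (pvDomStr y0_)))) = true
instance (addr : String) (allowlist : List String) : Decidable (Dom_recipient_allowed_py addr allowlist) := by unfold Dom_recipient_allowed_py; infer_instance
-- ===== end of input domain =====

-- B inverts the matching direction: one set of all normalized non-empty entries, candidates
-- generated from the address ('@'-suffixes of addr), answered by set membership only; objective: alternative.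

-- ===== PORT A =====
-- entry.strip().lower()
def paNorm (s : String) : List Char := PySem.Chars.lower (PySem.Chars.strip s.toList)

-- the for-loop with early returns
def paLoop (addrLower : List Char) : List String → Bool
  | [] => false
  | entry :: rest =>
    let entryLower := paNorm entry
    if entryLower = [] then paLoop addrLower rest
    else if PySem.Chars.startswith entryLower ['@'] then
      if PySem.Chars.endswith addrLower entryLower then true else paLoop addrLower rest
    else if addrLower = entryLower then true else paLoop addrLower rest

def recipient_allowed_py (addr : String) (allowlist : List String) : Bool :=
  if addr = "" ∨ allowlist = [] then false
  else paLoop (paNorm addr) allowlist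

-- ===== PORT B =====
-- entry.strip().lower()
def pbNorm (s : String) : List Char := PySem.Chars.lower (PySem.Chars.strip s.toList)

-- the set-building loop: entries = set of all normalized non-empty allowlist items
def pbEntries (l : List String) : PySem.Set (List Char) :=
  l.foldl (fun s raw => let e := pbNorm raw; if e = [] then s else PySem.Set.add s e) PySem.Set.empty

-- 'a in entries or any(a[i:] in entries for i, ch in enumerate(a) if ch == "@")'
def recipient_allowed_py_alt (addr : String) (allowlist : List String) : Bool :=
  if PySem.Set.contains (pbEntries allowlist) (pbNorm addr) then true
  else (PySem.List.enumerate (pbNorm addr)).any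
    (fun p => p.2 == '@' && PySem.Set.contains (pbEntries allowlist)
      (PySem.List.slice (pbNorm addr) (some p.1) none))

-- ===== PRECONDITION & SPEC =====
def Spec_recipient_allowed_py (addr : String) (allowlist : List String) (out : Bool) : Prop := out = recipient_allowed_py_alt addr allowlist
instance (addr : String) (allowlist : List String) (out : Bool) : Decidable (Spec_recipient_allowed_py addr allowlist out) := by unfold Spec_recipient_allowed_py; infer_instance

-- ===== CLAIM (what is proved, stated in full; the proofs are below) =====
def Claim_equal_recipient_allowed_py : Prop := ∀ (addr : String) (allowlist : List String), Dom_recipient_allowed_py addr allowlist → Spec_recipient_allowed_py addr allowlist (recipient_allowed_py addr allowlist)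

-- ===== LEMMAS AND PROOFS =====

-- the per-entry predicate A's loop decides
def pvPred (a : List Char) (entry : String) : Bool :=
  let e := paNorm entry
  if e = [] then false
  else if PySem.Chars.startswith e ['@'] then PySem.Chars.endswith a e
  else decide (a = e)

lemma paLoop_eq_any (a : List Char) (l : List String) : paLoop a l = l.any (pvPred a) := by
  induction l with
  | nil => rfl
  | cons e rest ih =>
    simp only [paLoop, pvPred, List.any_cons, ← ih]
    split_ifs <;> simp [*]

lemma pvPred_nil_eq_false (e : String) : pvPred [] e = false := by
  simp only [pvPred, paNorm]
  split_ifs with h1 h2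
  · rfl
  · rw [Bool.eq_false_iff]
    intro hend
    exact h1 (List.suffix_nil.mp ((PySem.Chars.endswith_iff _ _).mp hend))
  · simp only [decide_eq_false_iff_not]
    exact fun h => h1 h.symm

lemma A_eq_any (addr : String) (l : List String) :
    recipient_allowed_py addr l = l.any (pvPred (paNorm addr)) := by
  unfold recipient_allowed_py
  split_ifs with h
  · rcases h with h | h
    · subst h
      have hnil : paNorm "" = [] := rfl
      rw [hnil]
      simp [List.any_eq_false, pvPred_nil_eq_false]
    · subst h; rfl
  · exact paLoop_eq_any _ _

-- membership in the entry set
lemma mem_pbEntries (l : List String) (c : List Char) :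
    c ∈ pbEntries l ↔ (∃ e ∈ l, pbNorm e = c) ∧ c ≠ [] := by
  unfold pbEntries
  suffices h : ∀ (init : PySem.Set (List Char)),
      c ∈ l.foldl (fun s raw => let e := pbNorm raw; if e = [] then s else PySem.Set.add s e) init
      ↔ c ∈ init ∨ ((∃ e ∈ l, pbNorm e = c) ∧ c ≠ []) by
    rw [h PySem.Set.empty]
    simp [PySem.Set.empty]
  intro init
  induction l generalizing init with
  | nil => simp
  | cons e rest ih =>
    simp only [List.foldl_cons]
    by_cases h0 : pbNorm e = []
    · rw [show (let e' := pbNorm e; if e' = [] then init else PySem.Set.add init e') = init by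
        simp [h0]]
      rw [ih]
      constructor
      · rintro (h | ⟨⟨x, hx, hxc⟩, hc⟩)
        · exact Or.inl h
        · exact Or.inr ⟨⟨x, List.mem_cons_of_mem _ hx, hxc⟩, hc⟩
      · rintro (h | ⟨⟨x, hx, hxc⟩, hc⟩)
        · exact Or.inl h
        · rcases List.mem_cons.mp hx with rfl | hx'
          · exact absurd (hxc ▸ h0) hc
          · exact Or.inr ⟨⟨x, hx', hxc⟩, hc⟩
    · rw [show (let e' := pbNorm e; if e' = [] then init else PySem.Set.add init e')
          = PySem.Set.add init (pbNorm e) by simp [h0]]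
      rw [ih, PySem.Set.mem_add]
      constructor
      · rintro ((h | hc) | ⟨⟨x, hx, hxc⟩, hcne⟩)
        · exact Or.inl h
        · exact Or.inr ⟨⟨e, List.mem_cons_self .., hc.symm⟩, hc ▸ h0⟩
        · exact Or.inr ⟨⟨x, List.mem_cons_of_mem _ hx, hxc⟩, hcne⟩
      · rintro (h | ⟨⟨x, hx, hxc⟩, hcne⟩)
        · exact Or.inl (Or.inl h)
        · rcases List.mem_cons.mp hx with rfl | hx'
          · exact Or.inl (Or.inr hxc.symm)
          · exact Or.inr ⟨⟨x, hx', hxc⟩, hcne⟩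

lemma contains_pbEntries (l : List String) (c : List Char) :
    PySem.Set.contains (pbEntries l) c = true ↔ (∃ e ∈ l, pbNorm e = c) ∧ c ≠ [] := by
  rw [show (PySem.Set.contains (pbEntries l) c = true) ↔ c ∈ pbEntries l by
    simp [PySem.Set.contains]]
  exact mem_pbEntries l c

-- a tail matches iff it starts with '@' and satisfies P
def pvAt (P : List Char → Bool) (t : List Char) : Bool := (t.head? == some '@') && P t

-- the enumerate-any of B scans exactly the '@'-headed suffixes of a
lemma any_enum_aux (P : List Char → Bool) (pre a : List Char) :
    (PySem.List.enumerate a (pre.length : Int)).any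
      (fun p => p.2 == '@' && P (PySem.List.slice (pre ++ a) (some p.1) none))
    = a.tails.any (pvAt P) := by
  induction a generalizing pre with
  | nil => simp [PySem.List.enumerate, pvAt]
  | cons c a' ih =>
    rw [PySem.List.enumerate_cons]
    have hslice : PySem.List.slice (pre ++ c :: a') (some (pre.length : Int)) none = c :: a' := by
      rw [PySem.List.slice_from _ (Int.natCast_nonneg _)]
      simp
    have harr : ((pre.length : Int) + 1) = (((pre ++ [c]).length : Nat) : Int) := by
      push_cast [List.length_append, List.length_cons, List.length_nil]; omega
    have happ : pre ++ c :: a' = (pre ++ [c]) ++ a' := by simp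
    simp only [List.any_cons, hslice]
    rw [harr, happ, ih (pre ++ [c])]
    rw [List.tails_cons, List.any_cons]
    simp [pvAt]

lemma any_enum_iff (P : List Char → Bool) (a : List Char) :
    ((PySem.List.enumerate a).any
      (fun p => p.2 == '@' && P (PySem.List.slice a (some p.1) none)) = true)
    ↔ ∃ t, ('@' :: t) <:+ a ∧ P ('@' :: t) = true := by
  have h := any_enum_aux P [] a
  simp only [List.nil_append, List.length_nil, Nat.cast_zero] at h
  rw [show PySem.List.enumerate a = PySem.List.enumerate a 0 from rfl, h]
  rw [List.any_eq_true]
  constructor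
  · rintro ⟨t, ht, hP⟩
    cases t with
    | nil => simp [pvAt] at hP
    | cons c t' =>
      simp only [pvAt, List.head?_cons, beq_iff_eq, Option.some.injEq, Bool.and_eq_true] at hP
      obtain ⟨rfl, hP'⟩ := hP
      exact ⟨t', by rwa [List.mem_tails] at ht, hP'⟩
  · rintro ⟨t, ht, hP⟩
    refine ⟨'@' :: t, by rw [List.mem_tails]; exact ht, ?_⟩
    simp [pvAt, hP]

lemma startswith_at_iff (e : List Char) :
    PySem.Chars.startswith e ['@'] = true ↔ ∃ t, e = '@' :: t := by
  rw [PySem.Chars.startswith_iff]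
  constructor
  · rintro ⟨t, rfl⟩; exact ⟨t, rfl⟩
  · rintro ⟨t, rfl⟩; exact ⟨t, rfl⟩

-- B decides the same predicate: existence of a matching entry
lemma B_eq_any (addr : String) (l : List String) :
    recipient_allowed_py_alt addr l = l.any (pvPred (pbNorm addr)) := by
  have hnorm : pbNorm addr = paNorm addr := rfl
  rw [Bool.eq_iff_iff]
  unfold recipient_allowed_py_alt
  constructor
  · intro hB
    split_ifs at hB with hc
    · -- exact match: the address itself is an entry
      obtain ⟨⟨e, he, hee⟩, hane⟩ := (contains_pbEntries l _).mp hc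
      refine List.any_eq_true.mpr ⟨e, he, ?_⟩
      unfold pvPred
      rw [show paNorm e = pbNorm e from rfl, hee]
      rw [if_neg hane]
      by_cases hs : PySem.Chars.startswith (pbNorm addr) ['@'] = true
      · rw [if_pos hs]
        exact (PySem.Chars.endswith_iff _ _).mpr (List.suffix_refl _)
      · rw [if_neg hs]; simp
    · -- suffix match at an '@'-position of the address
      obtain ⟨t, hsuf, hP⟩ := (any_enum_iff _ (pbNorm addr)).mp hB
      obtain ⟨⟨e, he, hee⟩, -⟩ := (contains_pbEntries l ('@' :: t)).mp hP
      refine List.any_eq_true.mpr ⟨e, he, ?_⟩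
      unfold pvPred
      rw [show paNorm e = pbNorm e from rfl, hee]
      rw [if_neg (by simp), if_pos ((startswith_at_iff _).mpr ⟨t, rfl⟩)]
      exact (PySem.Chars.endswith_iff _ _).mpr hsuf
  · intro hA
    obtain ⟨e, he, hP⟩ := List.any_eq_true.mp hA
    unfold pvPred at hP
    rw [show paNorm e = pbNorm e from rfl] at hP
    by_cases h0 : pbNorm e = []
    · rw [if_pos h0] at hP; exact absurd hP (by simp)
    rw [if_neg h0] at hP
    by_cases hs : PySem.Chars.startswith (pbNorm e) ['@'] = true
    · rw [if_pos hs] at hP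
      obtain ⟨t, het⟩ := (startswith_at_iff _).mp hs
      have hsuf : ('@' :: t) <:+ pbNorm addr := het ▸ (PySem.Chars.endswith_iff _ _).mp hP
      have hmem : PySem.Set.contains (pbEntries l) ('@' :: t) = true :=
        (contains_pbEntries l ('@' :: t)).mpr ⟨⟨e, he, het⟩, by simp⟩
      split_ifs with hc
      · rfl
      · exact (any_enum_iff _ (pbNorm addr)).mpr ⟨t, hsuf, hmem⟩
    · rw [if_neg hs] at hP
      have hae : pbNorm addr = pbNorm e := of_decide_eq_true hP
      have hc : PySem.Set.contains (pbEntries l) (pbNorm addr) = true :=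
        (contains_pbEntries l _).mpr ⟨⟨e, he, hae.symm⟩, hae ▸ h0⟩
      rw [if_pos hc]

-- ===== VERDICT (by name: the statement is the Claim_ definition above) =====
theorem recipient_allowed_py_spec : Claim_equal_recipient_allowed_py := by
  intro addr allowlist _
  unfold Spec_recipient_allowed_py
  rw [A_eq_any, B_eq_any]
  rfl
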